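-- pv_equiv track=rewrite | github.com/avirupdandapat/ALGOPROJECT | NdigitnumSdigitsum.py | solve
-- ===== SOURCE A (Python) =====
-- def solve(N, S):
--     arr = [[0 for j in range(S + 1)] for i in range(N + 1)]
--     arr[0][0] = 1
--     for n in range(N):
--         for s in range(S):
--             for digit in range(10):
--                 if s + digit <= S:
--                     arr[n + 1][s + digit] += arr[n][s]
--                 else:
--                     break
--     return arr[N][S] % 1000000007
-- ===== SOURCE B (Python) =====
-- MOD = 1000000007
--
--
-- def solve(N, S):
--     # g[s] = number of length-n digit strings (digits 0-9, leading zeros allowed)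
--     # with digit sum s; computed for n = 0 .. N-1 by a rolling 1-D array whose
--     # next row is produced with an O(1) sliding-window sum instead of a 10-way
--     # inner loop.  The answer forces a nonzero last digit.
--     if N <= 0:
--         return 1 if (N == 0 and S == 0) else 0
--     g = [1] + [0] * S
--     for _ in range(N - 1):
--         new = []
--         w = 0
--         for t in range(S + 1):
--             w += g[t]
--             if t >= 10:
--                 w -= g[t - 10]
--             new.append(w)
--         g = new
--     return sum(g[S - d] for d in range(1, 10) if S - d >= 0) % MOD
-- ===== Notes on version B (the rewrite author's own statement) =====
-- stated objective: faster
-- what changed: Replaces A's 2-D push-style DP table with a 10-way inner digit loop by a rolling 1-D array whose next row is produced with an O(1) sliding-window running sum, and reads the answer as the sum over the nonzero last digit.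
-- outside the precondition, e.g. on solve(-1, 0): A raises IndexError, B returns 0; on solve(3, -2): A raises IndexError, B returns 0
import Mathlib
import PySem

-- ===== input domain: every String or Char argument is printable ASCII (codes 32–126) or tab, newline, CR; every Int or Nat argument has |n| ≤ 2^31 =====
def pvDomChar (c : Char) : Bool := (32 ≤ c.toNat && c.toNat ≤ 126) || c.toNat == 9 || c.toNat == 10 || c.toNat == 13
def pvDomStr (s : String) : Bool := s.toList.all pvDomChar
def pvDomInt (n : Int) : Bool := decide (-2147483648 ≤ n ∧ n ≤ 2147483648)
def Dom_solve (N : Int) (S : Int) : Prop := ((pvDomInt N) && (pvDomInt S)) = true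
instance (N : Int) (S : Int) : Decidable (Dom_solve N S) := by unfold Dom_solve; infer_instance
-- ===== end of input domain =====

-- B replaces A's 2-D push-style DP (10-way inner digit loop with break) by a rolling 1-D
-- array rebuilt with an O(1) sliding-window running sum, reading the answer off the last
-- row as a sum over the nonzero last digit; measured constant-factor faster.

-- ===== PORT A =====
-- arr[i][t] read / write; every use inside Pre_ has nonnegative in-range indices,
-- so pyGetD's default and .toNat are never reached (exact there)
def pvGetCell (arr : List (List Int)) (i t : Int) : Int :=
  PySem.List.pyGetD (PySem.List.pyGetD arr i []) t 0

def pvSetCell (arr : List (List Int)) (i t : Int) (v : Int) : List (List Int) :=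
  arr.set i.toNat ((PySem.List.pyGetD arr i []).set t.toNat v)

def pvDigitLoop (S n s : Int) : List Int → List (List Int) → List (List Int)
  | [], arr => arr
  | d :: ds, arr =>
      if s + d ≤ S then
        pvDigitLoop S n s ds
          (pvSetCell arr (n + 1) (s + d) (pvGetCell arr (n + 1) (s + d) + pvGetCell arr n s))
      else arr

def solve (N : Int) (S : Int) : Int :=
  let arr0 : List (List Int) :=
    (PySem.List.pyRange 0 (N + 1) 1).map (fun _ => (PySem.List.pyRange 0 (S + 1) 1).map (fun _ => (0 : Int)))
  let arr1 := pvSetCell arr0 0 0 1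
  let arr2 :=
    (PySem.List.pyRange 0 N 1).foldl (fun arr n =>
      (PySem.List.pyRange 0 S 1).foldl (fun arr s =>
        pvDigitLoop S n s (PySem.List.pyRange 0 10 1) arr) arr) arr1
  PySem.Int.mod (pvGetCell arr2 N S) 1000000007

-- ===== PORT B =====
def solve_alt (N : Int) (S : Int) : Int :=
  if N ≤ 0 then (if N = 0 ∧ S = 0 then 1 else 0)
  else
    let g0 : List Int := 1 :: List.replicate S.toNat 0
    let g :=
      (PySem.List.pyRange 0 (N - 1) 1).foldl (fun g _ =>
        ((PySem.List.pyRange 0 (S + 1) 1).foldl (fun (p : List Int × Int) t =>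
            let w := p.2 + PySem.List.pyGetD g t 0
            let w := if 10 ≤ t then w - PySem.List.pyGetD g (t - 10) 0 else w
            (p.1 ++ [w], w)) ([], 0)).1) g0
    PySem.Int.mod
      ((PySem.List.pyRange 1 10 1).foldl (fun acc d =>
        acc + (if 0 ≤ S - d then PySem.List.pyGetD g (S - d) 0 else 0)) 0)
      1000000007

-- ===== PRECONDITION & SPEC =====
-- Pre_ excludes exactly the inputs on which A raises IndexError (negative N or S give an
-- empty table before the arr[0][0] = 1 assignment); A returns on every input in Pre_.
def Pre_solve (N : Int) (S : Int) : Prop := 0 ≤ N ∧ 0 ≤ S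
instance (N : Int) (S : Int) : Decidable (Pre_solve N S) := by unfold Pre_solve; infer_instance

def pvWitness_solve : Int × Int := (3, 5)

def Spec_solve (N : Int) (S : Int) (out : Int) : Prop := out = solve_alt N S
instance (N : Int) (S : Int) (out : Int) : Decidable (Spec_solve N S out) := by unfold Spec_solve; infer_instance

-- ===== CLAIM (what is proved, stated in full; the proofs are below) =====
def Claim_equal_solve : Prop := ∀ (N : Int) (S : Int), Dom_solve N S → Pre_solve N S → Spec_solve N S (solve N S)

-- ===== LEMMAS AND PROOFS =====

-- cnt n s = number of length-n digit strings (digits 0-9) with digit sum s;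
-- tailSum Sn r = value of A's final cell arr[r][Sn] for r ≥ 1 (nonzero last digit)
def cnt : ℕ → ℕ → ℤ
  | 0, s => if s = 0 then 1 else 0
  | n + 1, s => ∑ d ∈ Finset.range 10, if d ≤ s then cnt n (s - d) else 0

def tailSum (Sn r : ℕ) : Int :=
  ∑ d ∈ Finset.range 10, if 1 ≤ d ∧ d ≤ Sn then cnt (r - 1) (Sn - d) else 0

def val (arr : List (List Int)) (i t : ℕ) : Int := (arr.getD i []).getD t 0

lemma pvGetCell_natCast (arr : List (List Int)) (i t : ℕ) :
    pvGetCell arr (i : Int) (t : Int) = val arr i t := by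
  simp [pvGetCell, val, PySem.List.pyGetD_natCast]

lemma pvSetCell_natCast (arr : List (List Int)) (i t : ℕ) (v : Int) :
    pvSetCell arr (i : Int) (t : Int) v = arr.set i ((arr.getD i []).set t v) := by
  simp [pvSetCell, PySem.List.pyGetD_natCast]

lemma getD_set_row (arr : List (List Int)) (i : ℕ) (r : List Int) (j : ℕ) :
    (arr.set i r).getD j [] = if i = j ∧ i < arr.length then r else arr.getD j [] := by
  rw [List.getD_eq_getElem?_getD, List.getD_eq_getElem?_getD, List.getElem?_set]
  split_ifs with h1 h2 h3 <;> simp_all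
  omega

lemma val_set (arr : List (List Int)) (i t : ℕ) (v : Int) (j u : ℕ)
    (hi : i < arr.length) (ht : t < (arr.getD i []).length) :
    val (arr.set i ((arr.getD i []).set t v)) j u
      = if j = i ∧ u = t then v else val arr j u := by
  unfold val
  rw [getD_set_row]
  by_cases hji : i = j
  · subst hji
    rw [if_pos ⟨rfl, hi⟩]
    rw [List.getD_eq_getElem?_getD (l := (arr.getD i []).set t v), List.getElem?_set]
    by_cases hut : t = u
    · subst hut
      rw [if_pos rfl, if_pos ht, if_pos ⟨rfl, rfl⟩]
      rfl
    · rw [if_neg hut, if_neg (by tauto), ← List.getD_eq_getElem?_getD]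
  · rw [if_neg (by tauto), if_neg (by tauto)]

lemma digitLoop_effect (Sn k m : ℕ) :
    ∀ (ds : List Int), List.Pairwise (· < ·) ds → (∀ d ∈ ds, 0 ≤ d) →
    ∀ arr : List (List Int), k + 1 < arr.length →
      (∀ i, i < arr.length → (arr.getD i []).length = Sn + 1) →
      (pvDigitLoop (Sn : Int) (k : Int) (m : Int) ds arr).length = arr.length ∧
      (∀ i, i < arr.length → ((pvDigitLoop (Sn : Int) (k : Int) (m : Int) ds arr).getD i []).length = Sn + 1) ∧
      (∀ j u : ℕ, val (pvDigitLoop (Sn : Int) (k : Int) (m : Int) ds arr) j u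
        = val arr j u +
          (if j = k + 1 ∧ ∃ d ∈ ds, (m : Int) + d = (u : Int) ∧ (m : Int) + d ≤ (Sn : Int)
           then val arr k m else 0)) := by
  intro ds
  induction ds with
  | nil =>
      intro _ _ arr hk hrows
      refine ⟨rfl, hrows, ?_⟩
      intro j u
      simp [pvDigitLoop]
  | cons d ds ih =>
      intro hsort hnn arr hk hrows
      have hdlt : ∀ d' ∈ ds, d < d' := (List.pairwise_cons.mp hsort).1
      have hd0 : 0 ≤ d := hnn d (by simp)
      by_cases hle : (m : Int) + d ≤ (Sn : Int)
      · -- head write happens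
        obtain ⟨dn, rfl⟩ : ∃ dn : ℕ, d = (dn : Int) := ⟨d.toNat, by omega⟩
        have hmdn : m + dn ≤ Sn := by exact_mod_cast hle
        have hcast1 : (k : Int) + 1 = ((k + 1 : ℕ) : Int) := by push_cast; ring
        have hcast2 : (m : Int) + (dn : Int) = ((m + dn : ℕ) : Int) := by push_cast; ring
        have hrowlen : (arr.getD (k+1) []).length = Sn + 1 := hrows (k+1) hk
        have harr1 : pvSetCell arr ((k:Int) + 1) ((m:Int) + (dn:Int))
              (pvGetCell arr ((k:Int) + 1) ((m:Int) + (dn:Int)) + pvGetCell arr (k:Int) (m:Int))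
            = arr.set (k+1) ((arr.getD (k+1) []).set (m+dn)
                (val arr (k+1) (m+dn) + val arr k m)) := by
          rw [hcast1, hcast2, pvSetCell_natCast, pvGetCell_natCast, pvGetCell_natCast]
        set arr1 := arr.set (k+1) ((arr.getD (k+1) []).set (m+dn)
            (val arr (k+1) (m+dn) + val arr k m)) with harr1def
        have hlen1 : arr1.length = arr.length := by simp [harr1def]
        have hval1 : ∀ j u : ℕ, val arr1 j u
            = if j = k + 1 ∧ u = m + dn then val arr (k+1) (m+dn) + val arr k m
              else val arr j u := by
          intro j u
          exact val_set arr (k+1) (m+dn) _ j u hk (by omega)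
        have hrows1 : ∀ i, i < arr1.length → (arr1.getD i []).length = Sn + 1 := by
          intro i hi
          rw [harr1def, getD_set_row]
          split_ifs with h
          · rw [List.length_set]; exact hrowlen
          · exact hrows i (by omega)
        obtain ⟨ihlen, ihrows, ihval⟩ :=
          ih (List.pairwise_cons.mp hsort).2 (fun d' hd' => hnn d' (by simp [hd']))
            arr1 (by omega) hrows1
        have hstep : pvDigitLoop (Sn:Int) (k:Int) (m:Int) ((dn:Int) :: ds) arr
            = pvDigitLoop (Sn:Int) (k:Int) (m:Int) ds arr1 := by
          simp only [pvDigitLoop, if_pos hle, harr1]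
        refine ⟨by rw [hstep, ihlen, hlen1], ?_, ?_⟩
        · intro i hi
          rw [hstep]
          exact ihrows i (by omega)
        · intro j u
          rw [hstep, ihval j u]
          have hv1km : val arr1 k m = val arr k m := by
            rw [hval1]; rw [if_neg (by omega)]
          rw [hv1km, hval1 j u]
          by_cases hhead : j = k + 1 ∧ u = m + dn
          · rw [if_pos hhead]
            have hnods : ¬ (j = k + 1 ∧ ∃ d' ∈ ds, (m:Int) + d' = (u:Int) ∧ (m:Int) + d' ≤ (Sn:Int)) := by
              rintro ⟨-, d', hd', heq, -⟩
              have := hdlt d' hd'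
              omega
            rw [if_neg hnods, if_pos ⟨hhead.1, (dn:Int), by simp, by omega, hle⟩]
            obtain ⟨rfl, rfl⟩ := hhead
            ring
          · rw [if_neg hhead]
            have hiff : (j = k + 1 ∧ ∃ d' ∈ ds, (m:Int) + d' = (u:Int) ∧ (m:Int) + d' ≤ (Sn:Int))
                ↔ (j = k + 1 ∧ ∃ d' ∈ (dn:Int) :: ds, (m:Int) + d' = (u:Int) ∧ (m:Int) + d' ≤ (Sn:Int)) := by
              constructor
              · rintro ⟨hj, d', hd', h1, h2⟩
                exact ⟨hj, d', by simp [hd'], h1, h2⟩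
              · rintro ⟨hj, d', hd', h1, h2⟩
                rcases List.mem_cons.mp hd' with rfl | hmem
                · exact absurd ⟨hj, by omega⟩ hhead
                · exact ⟨hj, d', hmem, h1, h2⟩
            rw [if_congr hiff rfl rfl]
      · -- break: nothing in d :: ds fires
        have hstep : pvDigitLoop (Sn:Int) (k:Int) (m:Int) (d :: ds) arr = arr := by
          simp only [pvDigitLoop, if_neg hle]
        refine ⟨by rw [hstep], by rw [hstep]; exact hrows, ?_⟩
        intro j u
        rw [hstep]
        have hno : ¬ (j = k + 1 ∧ ∃ d' ∈ d :: ds, (m:Int) + d' = (u:Int) ∧ (m:Int) + d' ≤ (Sn:Int)) := by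
          rintro ⟨-, d', hd', -, h2⟩
          rcases List.mem_cons.mp hd' with rfl | hmem
          · omega
          · have := hdlt d' hmem; omega
        rw [if_neg hno]
        ring

def finv (Sn k i t : ℕ) : Int :=
  if k < i then 0 else if t = Sn ∧ i ≠ 0 then tailSum Sn i else cnt i t

def part (k m t : ℕ) : Int :=
  ∑ s ∈ Finset.range m, if s ≤ t ∧ t ≤ s + 9 then cnt k s else 0

lemma inner_fold (Nn Sn k : ℕ) (hk : k < Nn) (arr : List (List Int))
    (hlen : arr.length = Nn + 1)
    (hrows : ∀ i, i < arr.length → (arr.getD i []).length = Sn + 1)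
    (hval : ∀ i t, i ≤ Nn → t ≤ Sn → val arr i t = finv Sn k i t)
    : ∀ m, m ≤ Sn →
      ((PySem.List.pyRange 0 (m : Int) 1).foldl
          (fun a s => pvDigitLoop (Sn:Int) (k:Int) s (PySem.List.pyRange 0 10 1) a) arr).length = Nn + 1 ∧
      (∀ i, i < Nn + 1 →
        (((PySem.List.pyRange 0 (m : Int) 1).foldl
          (fun a s => pvDigitLoop (Sn:Int) (k:Int) s (PySem.List.pyRange 0 10 1) a) arr).getD i []).length = Sn + 1) ∧
      (∀ i t, i ≤ Nn → t ≤ Sn →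
        val ((PySem.List.pyRange 0 (m : Int) 1).foldl
          (fun a s => pvDigitLoop (Sn:Int) (k:Int) s (PySem.List.pyRange 0 10 1) a) arr) i t
        = if i = k + 1 then part k m t else finv Sn k i t) := by
  intro m
  induction m with
  | zero =>
      intro _
      rw [show ((0:ℕ):Int) = 0 from rfl, PySem.List.pyRange_one_eq_nil (le_refl 0)]
      simp only [List.foldl_nil]
      refine ⟨hlen, fun i hi => hrows i (by omega), ?_⟩
      intro i t hi ht
      rw [hval i t hi ht]
      by_cases hik : i = k + 1
      · subst hik
        rw [if_pos rfl]
        unfold finv part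
        rw [if_pos (by omega)]
        simp
      · rw [if_neg hik]
  | succ m ih =>
      intro hm1
      have hm : m ≤ Sn := by omega
      obtain ⟨ihlen, ihrows, ihval⟩ := ih hm
      set arrm := (PySem.List.pyRange 0 (m : Int) 1).foldl
          (fun a s => pvDigitLoop (Sn:Int) (k:Int) s (PySem.List.pyRange 0 10 1) a) arr with harrm
      rw [show ((m+1:ℕ):Int) = (m:Int) + 1 from by push_cast; ring,
        PySem.List.pyRange_one_succ_right (show (0:Int) ≤ (m:Int) by positivity),
        List.foldl_append]
      simp only [List.foldl_cons, List.foldl_nil]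
      rw [← harrm]
      have hsorted : List.Pairwise (· < ·) (PySem.List.pyRange 0 10 1) :=
        PySem.List.pairwise_lt_pyRange_one 0 10
      have hnn : ∀ d ∈ PySem.List.pyRange 0 10 1, (0:Int) ≤ d := by
        intro d hd
        exact (PySem.List.mem_pyRange_one.mp hd).1
      obtain ⟨elen, erows, eval⟩ := digitLoop_effect Sn k m (PySem.List.pyRange 0 10 1)
        hsorted hnn arrm (by omega) (fun i hi => ihrows i (by omega))
      refine ⟨by rw [elen, ihlen], fun i hi => erows i (by omega), ?_⟩
      intro i t hi ht
      rw [eval i t]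
      have hvkm : val arrm k m = cnt k m := by
        rw [ihval k m (by omega) hm, if_neg (by omega)]
        unfold finv
        rw [if_neg (by omega), if_neg (by omega)]
      have hcond : (i = k + 1 ∧ ∃ d ∈ PySem.List.pyRange 0 10 1,
            (m:Int) + d = (t:Int) ∧ (m:Int) + d ≤ (Sn:Int))
          ↔ (i = k + 1 ∧ (m ≤ t ∧ t ≤ m + 9)) := by
        constructor
        · rintro ⟨hik, d, hd, h1, h2⟩
          have := PySem.List.mem_pyRange_one.mp hd
          exact ⟨hik, by omega, by omega⟩
        · rintro ⟨hik, h1, h2⟩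
          refine ⟨hik, (t:Int) - (m:Int), PySem.List.mem_pyRange_one.mpr ⟨by omega, by omega⟩, by ring, by omega⟩
      rw [if_congr hcond rfl rfl]
      by_cases hik : i = k + 1
      · subst hik
        rw [ihval _ t (by omega) ht, if_pos rfl, if_pos rfl]
        unfold part
        rw [Finset.sum_range_succ, hvkm]
        simp
      · rw [ihval i t hi ht, if_neg hik, if_neg hik, if_neg (by tauto)]
        ring

lemma part_lt (k Sn t : ℕ) (ht : t < Sn) : part k Sn t = cnt (k + 1) t := by
  unfold part
  rw [← Finset.sum_subset (by intro x hx; simp at hx ⊢; omega :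
        Finset.range (t+1) ⊆ Finset.range Sn)
      (by intro x hx hnx; simp at hx hnx; rw [if_neg (by omega)])]
  show (∑ s ∈ Finset.range (t+1), if s ≤ t ∧ t ≤ s + 9 then cnt k s else 0)
      = ∑ d ∈ Finset.range 10, if d ≤ t then cnt k (t - d) else 0
  rcases le_or_gt t 8 with h8 | h9
  · rw [← Finset.sum_subset (by intro x hx; simp at hx ⊢; omega :
          Finset.range (t+1) ⊆ Finset.range 10)
        (by intro x hx hnx; simp at hx hnx; rw [if_neg (by omega)])]
    rw [← Finset.sum_range_reflect (fun s => if s ≤ t ∧ t ≤ s + 9 then cnt k s else 0) (t+1)]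
    apply Finset.sum_congr rfl
    intro j hj
    simp only [Finset.mem_range] at hj
    rw [if_pos (by omega : t + 1 - 1 - j ≤ t ∧ t ≤ t + 1 - 1 - j + 9), if_pos (by omega : j ≤ t)]
    congr 1
  · rw [← Finset.sum_subset (by intro x hx; simp at hx ⊢; omega :
          Finset.Ico (t-9) (t+1) ⊆ Finset.range (t+1))
        (by intro x hx hnx; simp at hx hnx; rw [if_neg (by omega)])]
    rw [Finset.sum_Ico_eq_sum_range]
    rw [← Finset.sum_range_reflect (fun d => if d ≤ t then cnt k (t - d) else 0) 10]
    apply Finset.sum_congr (by congr 1; omega)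
    intro j hj
    simp only [Finset.mem_range] at hj
    have hj10 : j < 10 := by omega
    rw [if_pos (by omega : t - 9 + j ≤ t ∧ t ≤ t - 9 + j + 9), if_pos (by omega : 10 - 1 - j ≤ t)]
    congr 1
    omega

lemma part_Sn (k Sn : ℕ) : part k Sn Sn = tailSum Sn (k + 1) := by
  unfold part tailSum
  simp only [Nat.add_sub_cancel]
  rcases le_or_gt Sn 9 with h9 | h10
  · rw [← Finset.sum_subset (by intro x hx; simp at hx ⊢; omega :
          Finset.range (Sn+1) ⊆ Finset.range 10)
        (by intro x hx hnx; simp at hx hnx; rw [if_neg (by omega)])]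
    rw [← Finset.sum_range_reflect (fun d => if 1 ≤ d ∧ d ≤ Sn then cnt k (Sn - d) else 0) (Sn+1)]
    rw [Finset.sum_range_succ, if_neg (by omega), add_zero]
    apply Finset.sum_congr rfl
    intro j hj
    simp only [Finset.mem_range] at hj
    rw [if_pos (by omega : j ≤ Sn ∧ Sn ≤ j + 9),
      if_pos (by omega : 1 ≤ Sn + 1 - 1 - j ∧ Sn + 1 - 1 - j ≤ Sn)]
    congr 1
    omega
  · rw [← Finset.sum_subset (by intro x hx; simp at hx ⊢; omega :
          Finset.Ico (Sn-9) Sn ⊆ Finset.range Sn)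
        (by intro x hx hnx; simp at hx hnx; rw [if_neg (by omega)])]
    rw [Finset.sum_Ico_eq_sum_range]
    rw [← Finset.sum_range_reflect (fun d => if 1 ≤ d ∧ d ≤ Sn then cnt k (Sn - d) else 0) 10]
    rw [Finset.sum_range_succ, if_neg (by omega), add_zero]
    apply Finset.sum_congr (by congr 1; omega)
    intro j hj
    simp only [Finset.mem_range] at hj
    rw [if_pos (by omega : Sn - 9 + j ≤ Sn ∧ Sn ≤ Sn - 9 + j + 9),
      if_pos (by omega : 1 ≤ 10 - 1 - j ∧ 10 - 1 - j ≤ Sn)]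
    congr 1
    omega

lemma finv_succ (Sn k i t : ℕ) (hik : i ≠ k + 1) : finv Sn (k + 1) i t = finv Sn k i t := by
  unfold finv
  rcases lt_or_ge k i with h | h
  · rw [if_pos (by omega), if_pos h]
  · by_cases h2 : t = Sn ∧ i ≠ 0
    · rw [if_neg (by omega), if_pos h2, if_neg (by omega)]
    · rw [if_neg (by omega), if_neg h2, if_neg (by omega)]

lemma outer_fold_A (Nn Sn : ℕ) (arr1 : List (List Int))
    (h1 : arr1.length = Nn + 1)
    (h2 : ∀ i, i < Nn + 1 → (arr1.getD i []).length = Sn + 1)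
    (h3 : ∀ i t, i ≤ Nn → t ≤ Sn → val arr1 i t = finv Sn 0 i t) :
    ∀ k, k ≤ Nn →
      ((PySem.List.pyRange 0 (k : Int) 1).foldl (fun arr n =>
        (PySem.List.pyRange 0 (Sn : Int) 1).foldl (fun arr s =>
          pvDigitLoop (Sn : Int) n s (PySem.List.pyRange 0 10 1) arr) arr) arr1).length = Nn + 1 ∧
      (∀ i, i < Nn + 1 →
        (((PySem.List.pyRange 0 (k : Int) 1).foldl (fun arr n =>
          (PySem.List.pyRange 0 (Sn : Int) 1).foldl (fun arr s =>
            pvDigitLoop (Sn : Int) n s (PySem.List.pyRange 0 10 1) arr) arr) arr1).getD i []).length = Sn + 1) ∧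
      (∀ i t, i ≤ Nn → t ≤ Sn →
        val ((PySem.List.pyRange 0 (k : Int) 1).foldl (fun arr n =>
          (PySem.List.pyRange 0 (Sn : Int) 1).foldl (fun arr s =>
            pvDigitLoop (Sn : Int) n s (PySem.List.pyRange 0 10 1) arr) arr) arr1) i t
          = finv Sn k i t) := by
  intro k
  induction k with
  | zero =>
      intro _
      rw [show ((0:ℕ):Int) = 0 from rfl, PySem.List.pyRange_one_eq_nil (le_refl 0)]
      exact ⟨h1, h2, h3⟩
  | succ k ih =>
      intro hk1
      obtain ⟨ihlen, ihrows, ihval⟩ := ih (by omega)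
      set Ak := (PySem.List.pyRange 0 (k : Int) 1).foldl (fun arr n =>
          (PySem.List.pyRange 0 (Sn : Int) 1).foldl (fun arr s =>
            pvDigitLoop (Sn : Int) n s (PySem.List.pyRange 0 10 1) arr) arr) arr1 with hAk
      rw [show ((k+1:ℕ):Int) = (k:Int) + 1 from by push_cast; ring,
        PySem.List.pyRange_one_succ_right (show (0:Int) ≤ (k:Int) by positivity),
        List.foldl_append]
      simp only [List.foldl_cons, List.foldl_nil]
      rw [← hAk]
      obtain ⟨flen, frows, fval⟩ := inner_fold Nn Sn k (by omega) Ak ihlen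
        (fun i hi => ihrows i (by omega)) ihval Sn (le_refl Sn)
      refine ⟨flen, frows, ?_⟩
      intro i t hi ht
      rw [fval i t hi ht]
      by_cases hik : i = k + 1
      · subst hik
        rw [if_pos rfl]
        unfold finv
        rw [if_neg (by omega)]
        rcases eq_or_lt_of_le ht with rfl | hlt
        · rw [if_pos ⟨rfl, by omega⟩, part_Sn]
        · rw [if_neg (by omega), part_lt k Sn t hlt]
      · rw [if_neg hik, finv_succ Sn k i t hik]

lemma getD_map_const_zero (l : List Int) (t : ℕ) :
    (l.map (fun _ => (0:Int))).getD t 0 = 0 := by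
  rw [List.getD_eq_getElem?_getD, List.getElem?_map]
  rcases l[t]? with _ | x <;> rfl

lemma getD_map_const (l : List Int) (r : List Int) (i : ℕ) (h : i < l.length) :
    (l.map (fun _ => r)).getD i [] = r := by
  rw [List.getD_eq_getElem?_getD, List.getElem?_map, List.getElem?_eq_getElem h]
  rfl

theorem solve_char (N S : Int) (hN : 0 ≤ N) (hS : 0 ≤ S) :
    solve N S = PySem.Int.mod
      (if N.toNat = 0 then (if S.toNat = 0 then 1 else 0) else tailSum S.toNat N.toNat)
      1000000007 := by
  lift N to ℕ using hN with Nn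
  lift S to ℕ using hS with Sn
  unfold solve
  simp only [Int.toNat_natCast]
  set row0 : List Int := (PySem.List.pyRange 0 ((Sn:Int) + 1) 1).map (fun _ => (0 : Int)) with hrow0
  set arr0 : List (List Int) :=
    (PySem.List.pyRange 0 ((Nn:Int) + 1) 1).map (fun _ => row0) with harr0
  have hrow0len : row0.length = Sn + 1 := by
    rw [hrow0, List.length_map, PySem.List.length_pyRange_one]
    omega
  have harr0len : arr0.length = Nn + 1 := by
    rw [harr0, List.length_map, PySem.List.length_pyRange_one]
    omega
  have harr0get : ∀ i : ℕ, i < Nn + 1 → arr0.getD i [] = row0 := by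
    intro i hi
    exact getD_map_const _ row0 i (by rw [PySem.List.length_pyRange_one]; omega)
  have hval0 : ∀ i t : ℕ, val arr0 i t = 0 := by
    intro i t
    unfold val
    by_cases hi : i < Nn + 1
    · rw [harr0get i hi, hrow0, getD_map_const_zero]
    · rw [List.getD_eq_default _ _ (by omega : arr0.length ≤ i)]
      rfl
  have harr1 : pvSetCell arr0 0 0 1 = arr0.set 0 ((arr0.getD 0 []).set 0 1) := by
    rw [show (0:Int) = ((0:ℕ):Int) from rfl, pvSetCell_natCast]
  set arr1 := arr0.set 0 ((arr0.getD 0 []).set 0 1) with harr1def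
  rw [harr1]
  have h1len : arr1.length = Nn + 1 := by rw [harr1def, List.length_set]; exact harr0len
  have h1rows : ∀ i, i < Nn + 1 → (arr1.getD i []).length = Sn + 1 := by
    intro i hi
    rw [harr1def, getD_set_row]
    split_ifs with h
    · rw [List.length_set, harr0get 0 (by omega), hrow0len]
    · rw [harr0get i hi, hrow0len]
  have hfinv0 : ∀ t, finv Sn 0 0 t = (if t = 0 then 1 else 0) := by
    intro t
    unfold finv
    rw [if_neg (by omega), if_neg (by simp)]
    simp [cnt]
  have hfinvpos : ∀ i t, 0 < i → finv Sn 0 i t = 0 := by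
    intro i t h
    unfold finv
    rw [if_pos h]
  have h1val : ∀ i t, i ≤ Nn → t ≤ Sn → val arr1 i t = finv Sn 0 i t := by
    intro i t hi ht
    rw [harr1def, val_set arr0 0 0 1 i t (by omega)
      (by rw [harr0get 0 (by omega), hrow0len]; omega)]
    by_cases h0 : i = 0
    · subst h0
      rw [hfinv0 t]
      by_cases ht0 : t = 0
      · subst ht0; rw [if_pos ⟨rfl, rfl⟩, if_pos rfl]
      · rw [if_neg (by tauto), if_neg ht0, hval0]
    · rw [hfinvpos i t (by omega), if_neg (by tauto), hval0]
  obtain ⟨h2len, h2rows, h2val⟩ := outer_fold_A Nn Sn arr1 h1len h1rows h1val Nn (le_refl Nn)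
  rw [pvGetCell_natCast, h2val Nn Sn (le_refl Nn) (le_refl Sn)]
  have hfin : finv Sn Nn Nn Sn = if Nn = 0 then (if Sn = 0 then 1 else 0) else tailSum Sn Nn := by
    unfold finv
    rw [if_neg (lt_irrefl Nn)]
    by_cases hN0 : Nn = 0
    · subst hN0
      rw [if_neg (by simp), if_pos rfl]
      simp [cnt]
    · rw [if_pos ⟨rfl, hN0⟩, if_neg hN0]
  rw [hfin]
  rfl

-- B-side lemmas
lemma cnt_succ_zero (n : ℕ) : cnt (n + 1) 0 = cnt n 0 := by
  simp [cnt]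

lemma cnt_shift (n k : ℕ) (hk : 1 ≤ k) :
    cnt (n + 1) k = cnt (n + 1) (k - 1) + cnt n k - (if 10 ≤ k then cnt n (k - 10) else 0) := by
  rcases lt_or_ge k 10 with h | h
  · interval_cases k <;>
      simp [cnt, Finset.sum_range_succ] <;> ring
  · have h9 : ∀ d : ℕ, d ≤ 9 → d ≤ k - 1 := by omega
    simp only [cnt, Finset.sum_range_succ, Finset.sum_range_zero]
    have hle : (10:ℕ) ≤ k := h
    simp only [show (0:ℕ) ≤ k from by omega, show (1:ℕ) ≤ k from by omega,
      show (2:ℕ) ≤ k from by omega, show (3:ℕ) ≤ k from by omega,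
      show (4:ℕ) ≤ k from by omega, show (5:ℕ) ≤ k from by omega,
      show (6:ℕ) ≤ k from by omega, show (7:ℕ) ≤ k from by omega,
      show (8:ℕ) ≤ k from by omega, show (9:ℕ) ≤ k from by omega,
      show (0:ℕ) ≤ k - 1 from by omega, show (1:ℕ) ≤ k - 1 from by omega,
      show (2:ℕ) ≤ k - 1 from by omega, show (3:ℕ) ≤ k - 1 from by omega,
      show (4:ℕ) ≤ k - 1 from by omega, show (5:ℕ) ≤ k - 1 from by omega,
      show (6:ℕ) ≤ k - 1 from by omega, show (7:ℕ) ≤ k - 1 from by omega,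
      show (8:ℕ) ≤ k - 1 from by omega, show (9:ℕ) ≤ k - 1 from by omega,
      if_pos, hle]
    have e : ∀ j : ℕ, j ≤ 9 → k - 1 - j = k - (j+1) := by omega
    rw [e 0 (by omega), e 1 (by omega), e 2 (by omega), e 3 (by omega), e 4 (by omega),
      e 5 (by omega), e 6 (by omega), e 7 (by omega), e 8 (by omega), e 9 (by omega)]
    norm_num
    ring

def rowList (Sn n : ℕ) : List Int := (List.range (Sn + 1)).map (cnt n)

lemma rowList_getD (Sn n m : ℕ) (h : m ≤ Sn) : (rowList Sn n).getD m 0 = cnt n m := by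
  unfold rowList
  rw [List.getD_eq_getElem?_getD]
  simp [Nat.lt_succ_of_le h]

lemma rowList_zero (Sn : ℕ) : rowList Sn 0 = 1 :: List.replicate Sn 0 := by
  unfold rowList
  rw [List.range_succ_eq_map]
  simp only [List.map_cons, List.map_map]
  congr 1
  rw [List.eq_replicate_iff]
  refine ⟨by simp, ?_⟩
  intro b hb
  simp only [List.mem_map] at hb
  obtain ⟨k, _, rfl⟩ := hb
  rfl

-- B's inner sliding-window pass over one row
lemma window_pass (Sn n : ℕ) (m : ℕ) (hm : m ≤ Sn + 1) :
    (PySem.List.pyRange 0 (m : Int) 1).foldl (fun (p : List Int × Int) t =>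
        (p.1 ++ [if 10 ≤ t then p.2 + PySem.List.pyGetD (rowList Sn n) t 0 - PySem.List.pyGetD (rowList Sn n) (t - 10) 0
                 else p.2 + PySem.List.pyGetD (rowList Sn n) t 0],
         if 10 ≤ t then p.2 + PySem.List.pyGetD (rowList Sn n) t 0 - PySem.List.pyGetD (rowList Sn n) (t - 10) 0
         else p.2 + PySem.List.pyGetD (rowList Sn n) t 0)) ([], 0)
      = ((List.range m).map (cnt (n + 1)), if m = 0 then 0 else cnt (n + 1) (m - 1)) := by
  induction m with
  | zero => simp [PySem.List.pyRange_one_eq_nil]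
  | succ m ih =>
      have h0 : ((m : Int)) + 1 = ((m + 1 : ℕ) : Int) := by push_cast; ring
      rw [show ((m + 1 : ℕ) : Int) = (m : Int) + 1 from by push_cast; ring,
        PySem.List.pyRange_one_succ_right (by positivity), List.foldl_append,
        ih (by omega)]
      simp only [List.foldl_cons, List.foldl_nil]
      have hget : PySem.List.pyGetD (rowList Sn n) (m : Int) 0 = cnt n m := by
        rw [PySem.List.pyGetD_natCast]
        exact rowList_getD Sn n m (by omega)
      rw [hget]
      rcases Nat.eq_zero_or_pos m with rfl | hmpos
      · norm_num [cnt_succ_zero, List.range_succ]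
      · have hm0 : m ≠ 0 := by omega
        simp only [if_neg hm0, Nat.add_sub_cancel, if_neg (by omega : ¬ (m + 1 = 0))]
        rcases lt_or_ge (m : Int) 10 with h10 | h10
        · rw [if_neg (by omega), List.range_succ, List.map_append]
          have : cnt (n+1) (m-1) + cnt n m = cnt (n+1) m := by
            rw [cnt_shift n m hmpos, if_neg (by omega : ¬ (10 ≤ m))]
            ring
          simp [this]
        · have hge : (10:ℕ) ≤ m := by omega
          rw [if_pos h10]
          have hcast : (m : Int) - 10 = ((m - 10 : ℕ) : Int) := by
            push_cast [hge]; ring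
          rw [hcast, PySem.List.pyGetD_natCast]
          rw [rowList_getD Sn n (m - 10) (by omega)]
          have : cnt (n+1) (m-1) + cnt n m - cnt n (m - 10) = cnt (n+1) m := by
            rw [cnt_shift n m hmpos, if_pos hge]
          rw [List.range_succ, List.map_append]
          simp [this]

lemma term_eq (Sn r d : ℕ) (hd : 1 ≤ d) (h9 : d ≤ 9) :
    (if 0 ≤ (Sn : Int) - (d : Int) then PySem.List.pyGetD (rowList Sn r) ((Sn : Int) - (d : Int)) 0 else 0)
      = if 1 ≤ d ∧ d ≤ Sn then cnt r (Sn - d) else 0 := by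
  rcases le_or_gt d Sn with h | h
  · rw [if_pos (by omega : (0:Int) ≤ (Sn : Int) - (d : Int)), if_pos ⟨hd, h⟩]
    rw [show (Sn : Int) - (d : Int) = ((Sn - d : ℕ) : Int) from by push_cast [h]; ring]
    rw [PySem.List.pyGetD_natCast]
    exact rowList_getD Sn r (Sn - d) (by omega)
  · rw [if_neg (by omega : ¬ (0:Int) ≤ (Sn : Int) - (d : Int)), if_neg (by omega)]

lemma final_sum (Sn r : ℕ) :
    (PySem.List.pyRange 1 10 1).foldl (fun acc d =>
        acc + (if 0 ≤ (Sn : Int) - d then PySem.List.pyGetD (rowList Sn (r - 1)) ((Sn : Int) - d) 0 else 0)) 0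
      = tailSum Sn r := by
  have e : PySem.List.pyRange 1 10 1
      = [((1:ℕ):Int),((2:ℕ):Int),((3:ℕ):Int),((4:ℕ):Int),((5:ℕ):Int),((6:ℕ):Int),((7:ℕ):Int),((8:ℕ):Int),((9:ℕ):Int)] := by
    decide
  rw [e]
  simp only [List.foldl_cons, List.foldl_nil]
  rw [term_eq Sn (r-1) 1 (by omega) (by omega), term_eq Sn (r-1) 2 (by omega) (by omega),
    term_eq Sn (r-1) 3 (by omega) (by omega), term_eq Sn (r-1) 4 (by omega) (by omega),
    term_eq Sn (r-1) 5 (by omega) (by omega), term_eq Sn (r-1) 6 (by omega) (by omega),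
    term_eq Sn (r-1) 7 (by omega) (by omega), term_eq Sn (r-1) 8 (by omega) (by omega),
    term_eq Sn (r-1) 9 (by omega) (by omega)]
  simp [tailSum, Finset.sum_range_succ]

lemma body_eq (Sn n : ℕ) :
    ((PySem.List.pyRange 0 ((Sn : Int) + 1) 1).foldl (fun (p : List Int × Int) t =>
        (p.1 ++ [if 10 ≤ t then p.2 + PySem.List.pyGetD (rowList Sn n) t 0 - PySem.List.pyGetD (rowList Sn n) (t - 10) 0
                 else p.2 + PySem.List.pyGetD (rowList Sn n) t 0],
         if 10 ≤ t then p.2 + PySem.List.pyGetD (rowList Sn n) t 0 - PySem.List.pyGetD (rowList Sn n) (t - 10) 0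
         else p.2 + PySem.List.pyGetD (rowList Sn n) t 0)) ([], 0)).1 = rowList Sn (n + 1) := by
  rw [show ((Sn : Int) + 1) = ((Sn + 1 : ℕ) : Int) from by push_cast; ring,
    window_pass Sn n (Sn + 1) (by omega)]
  rfl

lemma outer_fold (Sn j : ℕ) :
    (PySem.List.pyRange 0 (j : Int) 1).foldl (fun g _ =>
        ((PySem.List.pyRange 0 ((Sn : Int) + 1) 1).foldl (fun (p : List Int × Int) t =>
            (p.1 ++ [if 10 ≤ t then p.2 + PySem.List.pyGetD g t 0 - PySem.List.pyGetD g (t - 10) 0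
                     else p.2 + PySem.List.pyGetD g t 0],
             if 10 ≤ t then p.2 + PySem.List.pyGetD g t 0 - PySem.List.pyGetD g (t - 10) 0
             else p.2 + PySem.List.pyGetD g t 0)) ([], 0)).1) (rowList Sn 0)
      = rowList Sn j := by
  induction j with
  | zero => simp [PySem.List.pyRange_one_eq_nil]
  | succ j ih =>
      rw [show ((j + 1 : ℕ) : Int) = (j : Int) + 1 from by push_cast; ring,
        PySem.List.pyRange_one_succ_right (show (0:Int) ≤ (j:Int) by positivity),
        List.foldl_append, ih]
      simp only [List.foldl_cons, List.foldl_nil]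
      exact body_eq Sn j

theorem solve_alt_char (N S : Int) (hN : 0 ≤ N) (hS : 0 ≤ S) :
    solve_alt N S = PySem.Int.mod
      (if N.toNat = 0 then (if S.toNat = 0 then 1 else 0) else tailSum S.toNat N.toNat)
      1000000007 := by
  lift N to ℕ using hN with Nn
  lift S to ℕ using hS with Sn
  unfold solve_alt
  simp only [Int.toNat_natCast]
  rcases Nat.eq_zero_or_pos Nn with rfl | hpos
  · rw [if_pos (by omega), if_pos rfl]
    rcases Nat.eq_zero_or_pos Sn with rfl | hspos
    · rw [if_pos ⟨rfl, rfl⟩, if_pos rfl]; decide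
    · rw [if_neg (by simp; omega), if_neg (by omega)]; decide
  · rw [if_neg (by exact_mod_cast by omega : ¬ ((Nn:Int) ≤ 0)), if_neg (by omega)]
    rw [show (1 :: List.replicate Sn (0:Int)) = rowList Sn 0 from (rowList_zero Sn).symm]
    rw [show ((Nn:Int) - 1) = ((Nn - 1 : ℕ) : Int) from by push_cast [hpos]; ring]
    rw [outer_fold Sn (Nn - 1)]
    rw [final_sum Sn Nn]

-- ===== VERDICT (by name: the statement is the Claim_ definition above) =====
theorem solve_spec : Claim_equal_solve := by
  intro N S _ hPre
  unfold Spec_solve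
  rw [solve_char N S hPre.1 hPre.2, solve_alt_char N S hPre.1 hPre.2]
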